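-- pv_equiv track=rewrite | github.com/WinDroidEmulation/proton-arm64-nightlies | scripts/fix_window_c.py | is_guarded
-- ===== SOURCE A (Python) =====
-- IFDEF = "#ifdef HAVE_X11_EXTENSIONS_XINPUT2_H"
--
-- def is_guarded(lines, idx):
--     """Return True if line idx is already inside a HAVE_X11_EXTENSIONS_XINPUT2_H block."""
--     depth = 0
--     for j in range(idx - 1, -1, -1):
--         s = lines[j].strip()
--         if s.startswith("#endif"):
--             depth += 1
--         elif s.startswith("#ifdef") or s.startswith("#if "):
--             if depth == 0:
--                 return IFDEF.strip() in s
--             depth -= 1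
--     return False
-- ===== SOURCE B (Python) =====
-- IFDEF = "#ifdef HAVE_X11_EXTENSIONS_XINPUT2_H"
--
-- def is_guarded(lines, idx):
--     """Forward scan keeping a stack of the open #if/#ifdef directives."""
--     stack = []
--     for j in range(idx):
--         s = lines[j].strip()
--         if s.startswith("#ifdef") or s.startswith("#if "):
--             stack.append(s)
--         elif s.startswith("#endif") and stack:
--             stack.pop()
--     return bool(stack) and IFDEF.strip() in stack[-1]
-- ===== Notes on version B (the rewrite author's own statement) =====
-- stated objective: alternative
-- what changed: Replaces A's backward scan with a depth counter by a forward scan over lines[0:idx] maintaining an explicit stack of the open #if/#ifdef directive strings; the answer is read off the top of the stack.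
import Mathlib
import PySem

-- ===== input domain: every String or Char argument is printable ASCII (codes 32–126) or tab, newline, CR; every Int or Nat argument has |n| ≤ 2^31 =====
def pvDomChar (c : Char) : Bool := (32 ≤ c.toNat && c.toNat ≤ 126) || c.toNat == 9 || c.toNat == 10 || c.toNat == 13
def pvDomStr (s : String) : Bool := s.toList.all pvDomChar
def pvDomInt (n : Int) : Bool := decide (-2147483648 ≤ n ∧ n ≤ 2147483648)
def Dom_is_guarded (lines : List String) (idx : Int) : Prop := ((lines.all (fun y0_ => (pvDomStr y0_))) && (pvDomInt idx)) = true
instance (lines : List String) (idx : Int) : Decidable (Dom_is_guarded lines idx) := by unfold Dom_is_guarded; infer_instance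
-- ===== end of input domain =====

-- B replaces A's backward scan with a depth counter by a forward scan that keeps a stack
-- of the open #if/#ifdef directive strings (objective: alternative, same cost).

def pvIfdef : String := "#ifdef HAVE_X11_EXTENSIONS_XINPUT2_H"

-- ===== PORT A =====
-- one iteration per index j of range(idx-1, -1, -1); early return inside the branch
def pvLoopA (lines : List String) : List Int → Int → Bool
  | [], _ => false
  | j :: js, depth =>
    match PySem.List.pyGet? lines j with
    | none => false   -- IndexError; excluded by Pre_
    | some line =>
      let s := PySem.Str.strip line
      if PySem.Str.startswith s "#endif" then
        pvLoopA lines js (depth + 1)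
      else if PySem.Str.startswith s "#ifdef" || PySem.Str.startswith s "#if " then
        (if depth = 0 then PySem.Str.isIn (PySem.Str.strip pvIfdef) s
         else pvLoopA lines js (depth - 1))
      else pvLoopA lines js depth

def is_guarded (lines : List String) (idx : Int) : Bool :=
  pvLoopA lines (PySem.List.pyRange (idx - 1) (-1) (-1)) 0

-- ===== PORT B =====
-- stack is kept head-first: Python's stack.append is cons, stack[-1] is the head, pop is tail
def pvStepB (lines : List String) (stack : List String) (j : Int) : List String :=
  match PySem.List.pyGet? lines j with
  | none => stack   -- IndexError; excluded by Pre_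
  | some line =>
    let s := PySem.Str.strip line
    if PySem.Str.startswith s "#ifdef" || PySem.Str.startswith s "#if " then s :: stack
    else if PySem.Str.startswith s "#endif" && !stack.isEmpty then stack.tail
    else stack

def is_guarded_alt (lines : List String) (idx : Int) : Bool :=
  match (PySem.List.pyRange 0 idx 1).foldl (pvStepB lines) [] with
  | [] => false
  | t :: _ => PySem.Str.isIn (PySem.Str.strip pvIfdef) t

-- ===== PRECONDITION & SPEC =====
-- Pre_ excludes exactly idx > len(lines), where both A and B raise IndexError.
def Pre_is_guarded (lines : List String) (idx : Int) : Prop := idx ≤ (lines.length : Int)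
instance (lines : List String) (idx : Int) : Decidable (Pre_is_guarded lines idx) := by unfold Pre_is_guarded; infer_instance

def pvWitness_is_guarded : List String × Int :=
  (["#ifdef HAVE_X11_EXTENSIONS_XINPUT2_H", "int x;"], 2)

def Spec_is_guarded (lines : List String) (idx : Int) (out : Bool) : Prop := out = is_guarded_alt lines idx
instance (lines : List String) (idx : Int) (out : Bool) : Decidable (Spec_is_guarded lines idx out) := by unfold Spec_is_guarded; infer_instance

-- ===== CLAIM (what is proved, stated in full; the proofs are below) =====
def Claim_equal_is_guarded : Prop := ∀ (lines : List String) (idx : Int), Dom_is_guarded lines idx → Pre_is_guarded lines idx → Spec_is_guarded lines idx (is_guarded lines idx)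

-- ===== LEMMAS AND PROOFS =====

def pvIsEnd (s : String) : Bool := PySem.Str.startswith s "#endif"
def pvIsOpen (s : String) : Bool := PySem.Str.startswith s "#ifdef" || PySem.Str.startswith s "#if "
def pvHit (s : String) : Bool := PySem.Str.isIn (PySem.Str.strip pvIfdef) s

-- A's loop, with the in-range lines already looked up
def pvScan : List String → Int → Bool
  | [], _ => false
  | line :: rest, depth =>
    let s := PySem.Str.strip line
    if pvIsEnd s then pvScan rest (depth + 1)
    else if pvIsOpen s then (if depth = 0 then pvHit s else pvScan rest (depth - 1))
    else pvScan rest depth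

-- B's step, with the in-range line already looked up
def pvBStep (st : List String) (line : String) : List String :=
  let s := PySem.Str.strip line
  if pvIsOpen s then s :: st
  else if pvIsEnd s && !st.isEmpty then st.tail
  else st

def pvCheck (st : List String) (dn : Nat) : Bool :=
  match st.drop dn with
  | [] => false
  | t :: _ => pvHit t

theorem pvEnd_not_open (s : String) (h : pvIsEnd s = true) : pvIsOpen s = false := by
  unfold pvIsEnd at h; unfold pvIsOpen
  rw [PySem.Str.startswith_eq, PySem.Chars.startswith_iff] at h
  rw [Bool.or_eq_false_iff]
  constructor <;>
  · rw [PySem.Str.startswith_eq, ← Bool.not_eq_true, PySem.Chars.startswith_iff]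
    intro hp
    have h2 := List.prefix_of_prefix_length_le hp h (by simp)
    revert h2; decide

-- core: A's backward depth-counting scan reads entry #depth of B's forward stack
theorem pvScan_stack (rs : List String) (dn : Nat) :
    pvScan rs (dn : Int) = pvCheck (rs.reverse.foldl pvBStep []) dn := by
  induction rs generalizing dn with
  | nil => simp [pvScan, pvCheck]
  | cons line rest ih =>
    simp only [pvScan, List.reverse_cons, List.foldl_append, List.foldl_cons, List.foldl_nil]
    by_cases hE : pvIsEnd (PySem.Str.strip line) = true
    · have hO := pvEnd_not_open _ hE
      simp only [pvBStep, hE, hO, Bool.false_eq_true, if_false, if_true, Bool.true_and]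
      cases h : rest.reverse.foldl pvBStep [] with
      | nil =>
        have hih := ih (dn + 1)
        rw [h] at hih
        push_cast at hih ⊢
        simp [hih, pvCheck]
      | cons a t =>
        have hih := ih (dn + 1)
        rw [h] at hih
        push_cast at hih ⊢
        simp only [hih, List.isEmpty_cons, Bool.not_false, if_true, List.tail_cons]
        simp [pvCheck, List.drop_succ_cons]
    · by_cases hO : pvIsOpen (PySem.Str.strip line) = true
      · simp only [pvBStep, hE, hO, Bool.false_eq_true, if_false, if_true]
        cases dn with
        | zero => simp [pvCheck]
        | succ k =>
          have hne : ((k + 1 : Nat) : Int) ≠ 0 := by push_cast; omega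
          have harg : ((k + 1 : Nat) : Int) - 1 = (k : Int) := by push_cast; ring
          simp only [hne, if_false, harg, ih k]
          simp [pvCheck, List.drop_succ_cons]
      · simp only [pvBStep, hE, hO, Bool.false_eq_true, if_false, Bool.false_and]
        exact ih dn

theorem pvRangeDesc (n : Nat) :
    PySem.List.pyRange (n : Int) (-1) (-1) = (n : Int) :: PySem.List.pyRange ((n : Int) - 1) (-1) (-1) := by
  simp only [PySem.List.pyRange]
  have h1 : ¬ ((-1 : Int) = 0) := by omega
  have h2 : ¬ ((0 : Int) < -1) := by omega
  have h3 : ((-1 : Int) < (n : Int)) := by omega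
  simp only [h1, h2, h3, if_false, if_pos]
  have hc : (((n : Int) - -1 + - -1 - 1) / - -1).toNat = n + 1 := by simp
  rw [hc]
  by_cases hn : (0 : Int) < (n : Int)
  · have h4 : ((-1 : Int) < (n : Int) - 1) := by omega
    simp only [h4, if_pos]
    have hc2 : (((n : Int) - 1 - -1 + - -1 - 1) / - -1).toNat = n := by simp
    rw [hc2, List.range_succ_eq_map]
    simp only [List.map_cons, List.map_map]
    refine List.cons_eq_cons.mpr ⟨by push_cast; ring, ?_⟩
    refine List.map_congr_left ?_
    intro k _
    simp only [Function.comp_apply]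
    push_cast
    ring
  · have hn0 : n = 0 := by omega
    subst hn0
    have h4 : ¬ ((-1 : Int) < (0 : Int) - 1) := by omega
    simp

theorem pvRangeDescNil (idx : Int) (h : idx ≤ 0) :
    PySem.List.pyRange (idx - 1) (-1) (-1) = [] := by
  simp only [PySem.List.pyRange]
  have h1 : ¬ ((-1 : Int) = 0) := by omega
  have h3 : ¬ ((-1 : Int) < idx - 1) := by omega
  simp [h1, h3]

theorem pvA2S (lines : List String) : ∀ (n : Nat), n ≤ lines.length → ∀ (d : Int),
    pvLoopA lines (PySem.List.pyRange ((n : Int) - 1) (-1) (-1)) d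
      = pvScan (lines.take n).reverse d := by
  intro n
  induction n with
  | zero => intro _ d; rw [show ((0 : Nat) : Int) - 1 = (0 : Int) - 1 by norm_cast,
      pvRangeDescNil 0 le_rfl]; simp [pvLoopA, pvScan]
  | succ m ih =>
    intro hn d
    have hm : m < lines.length := by omega
    rw [show ((m + 1 : Nat) : Int) - 1 = (m : Int) by push_cast; ring, pvRangeDesc m]
    rw [List.take_add_one, List.getElem?_eq_getElem hm]
    simp only [Option.toList_some, List.reverse_append, List.reverse_singleton,
      List.singleton_append]
    simp only [pvLoopA, pvScan, pvIsEnd, pvIsOpen, pvHit,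
      PySem.List.pyGet?_natCast, List.getElem?_eq_getElem hm]
    split_ifs <;> first | rfl | exact ih (by omega) _

theorem pvB2S (lines : List String) (n : Nat) (hn : n ≤ lines.length) (st : List String) :
    (PySem.List.pyRange 0 (n : Int) 1).foldl (pvStepB lines) st
      = (lines.take n).foldl pvBStep st := by
  induction n generalizing st with
  | zero => rw [show ((0 : Nat) : Int) = (0 : Int) by norm_cast,
      PySem.List.pyRange_one_eq_nil le_rfl]; simp
  | succ m ih =>
    have hm : m < lines.length := by omega
    rw [show ((m + 1 : Nat) : Int) = (m : Int) + 1 by push_cast; ring,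
      PySem.List.pyRange_one_succ_right (by positivity), List.foldl_append, ih (by omega)]
    rw [List.take_add_one, List.getElem?_eq_getElem hm]
    simp only [Option.toList_some, List.foldl_append, List.foldl_cons, List.foldl_nil]
    simp only [pvStepB, pvBStep, pvIsEnd, pvIsOpen,
      PySem.List.pyGet?_natCast, List.getElem?_eq_getElem hm]
    rfl

-- ===== VERDICT (by name: the statement is the Claim_ definition above) =====
theorem is_guarded_spec : Claim_equal_is_guarded := by
  intro lines idx _ hpre
  unfold Spec_is_guarded
  by_cases h : idx ≤ 0
  · unfold is_guarded is_guarded_alt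
    rw [pvRangeDescNil idx h, PySem.List.pyRange_one_eq_nil h]
    simp [pvLoopA]
  · obtain ⟨n, rfl⟩ : ∃ n : Nat, idx = (n : Int) :=
      ⟨idx.toNat, (Int.toNat_of_nonneg (by omega)).symm⟩
    have hn : n ≤ lines.length := by unfold Pre_is_guarded at hpre; exact_mod_cast hpre
    unfold is_guarded is_guarded_alt
    rw [pvA2S lines n hn 0, pvB2S lines n hn []]
    have hstack := pvScan_stack ((lines.take n).reverse) 0
    simp only [Nat.cast_zero, List.reverse_reverse] at hstack
    rw [hstack]
    cases hfold : (lines.take n).foldl pvBStep [] <;> simp [pvCheck, pvHit]
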